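-- pv_equiv track=rewrite | github.com/doushenyiyezhiqiu/amazon_ng_oa1 | minimal_move.py | minimal_move
-- ===== SOURCE A (Python) =====
-- def minimal_move(nums):
--     one_pos = []
--     n = len(nums)
--     for i in range(n):
--         if nums[i] == 1:
--             one_pos.append(i)
--     # put all '1's to the tail
--     m = len(one_pos)
--     res1, res2 = 0, 0
--     for i in range(len(one_pos)):
--         res1 += n - m + i - one_pos[i]
--     # put all '1's to the head
--     for i in range(len(one_pos)):
--         res2 += one_pos[i] - i
--     return min(res1, res2)
-- ===== SOURCE B (Python) =====
-- def minimal_move(nums):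
--     # Count inversions: moving every 1 to the head costs one adjacent swap per
--     # (non-1, 1) pair appearing in that order; to the tail, per (1, non-1) pair.
--     zeros = ones = to_head = to_tail = 0
--     for x in nums:
--         if x == 1:
--             to_head += zeros
--             ones += 1
--         else:
--             to_tail += ones
--             zeros += 1
--     return min(to_head, to_tail)
-- ===== Notes on version B (the rewrite author's own statement) =====
-- stated objective: alternative
-- what changed: B counts inversion pairs ((non-1,1) pairs for the head cost, (1,non-1) pairs for the tail cost) with two running counters in a single pass, instead of A's collecting the 1-positions and summing position-minus-rank index offsets in two further loops.
import Mathlib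
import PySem

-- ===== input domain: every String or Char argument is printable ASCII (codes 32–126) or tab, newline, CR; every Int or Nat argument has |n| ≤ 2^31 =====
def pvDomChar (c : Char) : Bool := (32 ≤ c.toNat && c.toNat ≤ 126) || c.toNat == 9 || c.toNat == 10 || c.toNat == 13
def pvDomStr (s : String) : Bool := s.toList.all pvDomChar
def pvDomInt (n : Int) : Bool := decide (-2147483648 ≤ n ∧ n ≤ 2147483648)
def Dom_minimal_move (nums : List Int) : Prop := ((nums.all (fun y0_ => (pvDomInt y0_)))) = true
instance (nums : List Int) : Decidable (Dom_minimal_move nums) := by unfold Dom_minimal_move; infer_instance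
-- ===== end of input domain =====

-- B counts inversion pairs with running counters in one pass instead of A's position-list and index-offset sums; objective: alternative.


-- ===== PORT A =====
def minimal_move (nums : List Int) : Int :=
  let n : Int := (nums.length : Int)
  let one_pos : List Int :=
    (PySem.List.pyRange 0 n 1).foldl
      (fun acc i => if PySem.List.pyGetD nums i 0 = 1 then acc ++ [i] else acc) []
  let m : Int := (one_pos.length : Int)
  let res1 : Int :=
    (PySem.List.pyRange 0 (one_pos.length : Int) 1).foldl
      (fun acc i => acc + (n - m + i - PySem.List.pyGetD one_pos i 0)) 0
  let res2 : Int :=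
    (PySem.List.pyRange 0 (one_pos.length : Int) 1).foldl
      (fun acc i => acc + (PySem.List.pyGetD one_pos i 0 - i)) 0
  min res1 res2

-- ===== PORT B =====
-- state = (zeros, ones, to_head, to_tail)
def minimal_move_alt (nums : List Int) : Int :=
  let st : Int × Int × Int × Int :=
    nums.foldl
      (fun (s : Int × Int × Int × Int) x =>
        if x = 1 then (s.1, s.2.1 + 1, s.2.2.1 + s.1, s.2.2.2)
        else (s.1 + 1, s.2.1, s.2.2.1, s.2.2.2 + s.2.1))
      (0, 0, 0, 0)
  min st.2.2.1 st.2.2.2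

-- ===== PRECONDITION & SPEC =====
def Spec_minimal_move (nums : List Int) (out : Int) : Prop := out = minimal_move_alt nums
instance (nums : List Int) (out : Int) : Decidable (Spec_minimal_move nums out) := by unfold Spec_minimal_move; infer_instance

-- ===== CLAIM (what is proved, stated in full; the proofs are below) =====
def Claim_equal_minimal_move : Prop := ∀ (nums : List Int), Dom_minimal_move nums → Spec_minimal_move nums (minimal_move nums)

-- ===== LEMMAS AND PROOFS =====

-- positions (as Ints, starting at offset s) of the elements equal to 1
def opos : List Int → Int → List Int
  | [], _ => []
  | x :: xs, s => if x = 1 then s :: opos xs (s + 1) else opos xs (s + 1)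

-- number of ones / non-ones, head/tail inversion-pair counts
def oc : List Int → Int
  | [] => 0
  | x :: xs => (if x = 1 then 1 else 0) + oc xs
def zc : List Int → Int
  | [] => 0
  | x :: xs => (if x = 1 then 0 else 1) + zc xs
def hc : List Int → Int
  | [] => 0
  | x :: xs => (if x = 1 then 0 else oc xs) + hc xs
def tc : List Int → Int
  | [] => 0
  | x :: xs => (if x = 1 then zc xs else 0) + tc xs

-- an index loop 'for i in range(s, len(xs)): … i … xs[i] …' is a fold over enumerate of the dropped list
theorem foldl_pyRange_index_enum {α β : Type} (d : α) (g : β → Int → α → β) :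
    ∀ (ys xs : List α) (s : Int) (init : β), 0 ≤ s → ys = xs.drop s.toNat →
    (PySem.List.pyRange s (xs.length : Int) 1).foldl (fun acc i => g acc i (PySem.List.pyGetD xs i d)) init
      = (PySem.List.enumerate ys s).foldl (fun acc p => g acc p.1 p.2) init := by
  intro ys
  induction ys with
  | nil =>
      intro xs s init hs hdrop
      have hlen : (xs.length : Int) ≤ s := by
        have := List.drop_eq_nil_iff.mp hdrop.symm
        omega
      rw [PySem.List.pyRange_one_eq_nil hlen]
      simp [PySem.List.enumerate]
  | cons y ys ih =>
      intro xs s init hs hdrop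
      have hlt : s.toNat < xs.length := by
        by_contra h
        rw [List.drop_eq_nil_iff.mpr (by omega)] at hdrop
        simp at hdrop
      have hslt : s < (xs.length : Int) := by omega
      have hd : xs.drop s.toNat = xs[s.toNat] :: xs.drop (s.toNat + 1) :=
        List.drop_eq_getElem_cons hlt
      rw [hd] at hdrop
      obtain ⟨hy, hys⟩ : y = xs[s.toNat] ∧ ys = xs.drop (s.toNat + 1) := by
        constructor <;> [exact (List.cons.injEq .. ▸ hdrop).1; exact (List.cons.injEq .. ▸ hdrop).2]
      rw [PySem.List.pyRange_one_cons hslt]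
      have hget : PySem.List.pyGetD xs s d = y := by
        rw [PySem.List.pyGetD_of_nonneg xs d hs]
        simp [List.getD, List.getElem?_eq_getElem hlt, hy]
      simp only [List.foldl_cons, PySem.List.enumerate, hget]
      exact ih xs (s + 1) _ (by omega) (by rw [hys]; congr 1; omega)

theorem onepos_fold (xs : List Int) :
    ∀ (s : Int) (acc : List Int),
    (PySem.List.enumerate xs s).foldl (fun acc p => if p.2 = 1 then acc ++ [p.1] else acc) acc
      = acc ++ opos xs s := by
  induction xs with
  | nil => intro s acc; simp [PySem.List.enumerate, opos]
  | cons x xs ih =>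
      intro s acc
      simp only [PySem.List.enumerate, List.foldl_cons, opos]
      by_cases hx : x = 1 <;> simp [hx, ih]

-- a summing fold is init + sum of the mapped list
theorem foldl_add_sum {α : Type} (f : α → Int) :
    ∀ (l : List α) (init : Int),
    l.foldl (fun acc x => acc + f x) init = init + (l.map f).sum := by
  intro l
  induction l with
  | nil => simp
  | cons x l ih => intro init; simp [ih]; ring

theorem opos_length (xs : List Int) : ∀ s, ((opos xs s).length : Int) = oc xs := by
  induction xs with
  | nil => intro s; simp [opos, oc]
  | cons x xs ih =>
      intro s
      by_cases hx : x = 1 <;> simp [opos, oc, hx, ih] <;> ring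

theorem zc_eq (xs : List Int) : zc xs = (xs.length : Int) - oc xs := by
  induction xs with
  | nil => simp [zc, oc]
  | cons x xs ih => by_cases hx : x = 1 <;> simp [zc, oc, hx, ih] <;> ring

theorem hc_add_tc (xs : List Int) : hc xs + tc xs = oc xs * zc xs := by
  induction xs with
  | nil => simp [hc, tc, oc, zc]
  | cons x xs ih =>
      by_cases hx : x = 1 <;> simp [hc, tc, oc, zc, hx] <;> nlinarith [ih]

-- Σ (pos - rank) over the enumerated 1-positions equals the head inversion count (offset-shifted)
theorem opos_sum (xs : List Int) :
    ∀ (s c : Int),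
    ((PySem.List.enumerate (opos xs s) c).map (fun p => p.2 - p.1)).sum
      = hc xs + (s - c) * oc xs := by
  induction xs with
  | nil => intro s c; simp [opos, hc, oc, PySem.List.enumerate]
  | cons x xs ih =>
      intro s c
      by_cases hx : x = 1
      · simp only [opos, hc, oc, hx, if_true, PySem.List.enumerate, List.map_cons,
          List.sum_cons, ih (s + 1) (c + 1)]
        ring
      · simp only [opos, hc, oc, hx, if_false, ite_false, ih (s + 1) c]
        ring

-- Σ (n - m + rank - pos) = len*(n-m) - Σ (pos - rank)
theorem sum_tail_head (n m : Int) :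
    ∀ (l : List (Int × Int)),
    (l.map (fun p => n - m + p.1 - p.2)).sum
      = (l.length : Int) * (n - m) - (l.map (fun p => p.2 - p.1)).sum := by
  intro l
  induction l with
  | nil => simp
  | cons p l ih => simp [ih]; ring

-- B's fold, fully generalized over the starting state
theorem alt_fold (xs : List Int) :
    ∀ (z o h t : Int),
    xs.foldl
      (fun (s : Int × Int × Int × Int) x =>
        if x = 1 then (s.1, s.2.1 + 1, s.2.2.1 + s.1, s.2.2.2)
        else (s.1 + 1, s.2.1, s.2.2.1, s.2.2.2 + s.2.1))
      (z, o, h, t)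
      = (z + zc xs, o + oc xs, h + hc xs + z * oc xs, t + tc xs + o * zc xs) := by
  induction xs with
  | nil => intro z o h t; simp [zc, oc, hc, tc]
  | cons x xs ih =>
      intro z o h t
      by_cases hx : x = 1
      · simp only [List.foldl_cons, hx, if_pos rfl, ih]
        simp [zc, oc, hc, tc, hx]
        refine ⟨by ring, by ring, by ring⟩
      · simp only [List.foldl_cons, if_neg hx, ih]
        simp [zc, oc, hc, tc, hx]
        refine ⟨by ring, by ring, by ring⟩

-- ===== VERDICT (by name: the statement is the Claim_ definition above) =====
theorem minimal_move_spec : Claim_equal_minimal_move := by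
  intro nums _
  unfold Spec_minimal_move minimal_move minimal_move_alt
  simp only []
  rw [foldl_pyRange_index_enum (0:Int) (fun acc i v => if v = 1 then acc ++ [i] else acc) nums nums 0 [] (by omega) (by simp)]
  rw [onepos_fold nums 0 []]
  simp only [List.nil_append]
  rw [alt_fold nums 0 0 0 0]
  set P := opos nums 0 with hP
  set n : Int := (nums.length : Int) with hn
  set m : Int := (P.length : Int) with hm
  rw [foldl_pyRange_index_enum (0:Int) (fun acc i v => acc + (n - m + i - v)) P P 0 0 (by omega) (by simp)]
  rw [foldl_pyRange_index_enum (0:Int) (fun acc i v => acc + (v - i)) P P 0 0 (by omega) (by simp)]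
  rw [foldl_add_sum (fun p : Int × Int => n - m + p.1 - p.2)]
  rw [foldl_add_sum (fun p : Int × Int => p.2 - p.1)]
  rw [sum_tail_head]
  have hlen : ((PySem.List.enumerate P 0).length : Int) = (P.length : Int) := by
    simp [PySem.List.length_enumerate]
  rw [hlen]
  rw [hP, opos_sum nums 0 0]
  have hm' : m = oc nums := by rw [hm, hP, opos_length nums 0]
  have hz : zc nums = n - oc nums := by rw [zc_eq, hn]
  have hht := hc_add_tc nums
  simp only [zero_add, zero_mul, add_zero, hm']
  have e1 : oc nums * (n - oc nums) - (hc nums + (0 - 0) * oc nums) = tc nums := by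
    rw [← hz]; nlinarith [hht]
  have e2 : hc nums + (0 - 0) * oc nums = hc nums := by ring
  have e0 : ((opos nums 0).length : Int) = oc nums := opos_length nums 0
  rw [e0, e1, e2, min_comm]
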